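-- pv_equiv track=rewrite | github.com/jsw4215/algorithm_study | Today_Q/220216/card2_boj_2164.py | solution
-- ===== SOURCE A (Python) =====
-- from collections import deque
--
-- def solution(s):
--     dq = deque([])
--
--     result = 0
--
--     for i in range(1,s+1):
--         dq.append(i)
--
--     while len(dq)>1:
--         dq.popleft()
--         temp=dq.popleft()
--         dq.append(temp)
--
--
--     return dq.pop()
-- ===== SOURCE B (Python) =====
-- def solution(s):
--     # Josephus-style "discard one, move one" survivor in closed form:
--     # with p the largest power of two <= s, the answer is s if s == p else 2*(s - p).
--     p = 1 << (s.bit_length() - 1)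
--     return s if s == p else 2 * (s - p)
-- ===== Notes on version B (the rewrite author's own statement) =====
-- stated objective: faster
-- what changed: Replaces the O(n) deque simulation of the card game by the closed-form Josephus formula: with p the largest power of two <= s, the answer is s if s is a power of two, else 2*(s-p).
import Mathlib
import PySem

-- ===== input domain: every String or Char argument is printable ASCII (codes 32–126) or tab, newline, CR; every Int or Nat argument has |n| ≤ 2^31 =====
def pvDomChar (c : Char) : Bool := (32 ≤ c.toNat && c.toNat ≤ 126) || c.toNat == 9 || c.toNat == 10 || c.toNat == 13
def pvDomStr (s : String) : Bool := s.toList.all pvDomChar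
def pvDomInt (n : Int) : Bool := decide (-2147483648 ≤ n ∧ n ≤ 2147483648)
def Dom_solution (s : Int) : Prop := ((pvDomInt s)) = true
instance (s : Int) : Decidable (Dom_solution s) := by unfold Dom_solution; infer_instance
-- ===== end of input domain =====

-- B replaces A's linear deque simulation by the closed-form Josephus answer.

-- ===== PORT A =====
-- the deque, as CPython implements it: front part, reversed back part, tracked length
def dqAppend (d : List Int × List Int × Nat) (x : Int) : List Int × List Int × Nat :=
  (d.1, x :: d.2.1, d.2.2 + 1)

def dqPopleft? (d : List Int × List Int × Nat) : Option (Int × (List Int × List Int × Nat)) :=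
  match d with
  | (x :: f, b, n + 1) => some (x, (f, b, n))
  | ([], b, n + 1) =>
      match b.reverse with
      | x :: f => some (x, (f, [], n))
      | [] => none
  | _ => none

def dqLen (d : List Int × List Int × Nat) : Nat := d.2.2

def dqToList (d : List Int × List Int × Nat) : List Int := d.1 ++ d.2.1.reverse

-- the while loop: dq.popleft(); temp = dq.popleft(); dq.append(temp)
-- (fuel only makes it total: each iteration shrinks the deque by one, so dqLen fuel suffices)
def solLoopD : Nat → (List Int × List Int × Nat) → (List Int × List Int × Nat)
  | 0, d => d
  | fuel + 1, d =>
      if dqLen d ≤ 1 then d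
      else
        match dqPopleft? d with
        | none => d
        | some (_, d1) =>
            match dqPopleft? d1 with
            | none => d1
            | some (temp, d2) => solLoopD fuel (dqAppend d2 temp)

def solution (s : Int) : Int :=
  -- the for loop appends 1..s; the final dq.pop() takes the last element
  -- (dq.pop() raises IndexError on the empty deque, i.e. for s ≤ 0 — excluded by Pre_)
  let dq := (PySem.List.pyRange 1 (s + 1) 1).foldl dqAppend ([], [], 0)
  ((dqToList (solLoopD (dqLen dq) dq)).getLast?).getD 0

-- ===== PORT B =====
def solution_alt (s : Int) : Int :=
  -- p = 1 << (s.bit_length() - 1); bit_length is on |s|, so p = 2 ^ (floor log2 of |s|)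
  let p : Int := (2 : Int) ^ (Nat.log2 s.natAbs)
  if s = p then s else 2 * (s - p)

-- ===== PRECONDITION & SPEC =====
-- Pre_ excludes s ≤ 0, where A's final dq.pop() raises IndexError on the empty deque.
def Pre_solution (s : Int) : Prop := 1 ≤ s
instance (s : Int) : Decidable (Pre_solution s) := by unfold Pre_solution; infer_instance
def pvWitness_solution : Int := 6

def Spec_solution (s : Int) (out : Int) : Prop := out = solution_alt s
instance (s : Int) (out : Int) : Decidable (Spec_solution s out) := by unfold Spec_solution; infer_instance

-- ===== CLAIM (what is proved, stated in full; the proofs are below) =====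
def Claim_equal_solution : Prop := ∀ (s : Int), Dom_solution s → Pre_solution s → Spec_solution s (solution s)

-- ===== LEMMAS AND PROOFS =====

-- reference simulation on a plain list (dqToList of the deque)
def solLoop : List Int → List Int
  | _ :: b :: t => solLoop (t ++ [b])
  | l => l
termination_by l => l.length
decreasing_by simp

def es : List Int → List Int
  | _ :: b :: t => b :: es t
  | _ => []
lemma solLoop_nil : solLoop [] = [] := by rw [solLoop]; simp
lemma solLoop_one (a : Int) : solLoop [a] = [a] := by rw [solLoop]; simp
lemma solLoop_cons (a b : Int) (t : List Int) : solLoop (a :: b :: t) = solLoop (t ++ [b]) := by rw [solLoop]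
lemma solLoop_map (g : Int → Int) (l : List Int) :
    solLoop (l.map g) = (solLoop l).map g := by
  induction l using solLoop.induct with
  | case1 a b t ih =>
      simp only [List.map_cons, solLoop_cons]
      simpa using ih
  | case2 l hh =>
      match l, hh with
      | [], _ => simp [solLoop]
      | [a], _ => rw [solLoop, solLoop] <;> simp
      | a :: b :: t, hh => exact absurd rfl (hh a b t)
lemma even_pass (m : Nat) : ∀ (l acc : List Int), l.length = 2 * m →
    solLoop (l ++ acc) = solLoop (acc ++ es l) := by
  induction m with
  | zero => intro l acc h; simp at h; simp [h, es]
  | succ m ih =>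
      intro l acc h
      match l with
      | a :: b :: t =>
          simp at h
          rw [List.cons_append, List.cons_append, solLoop_cons]
          rw [List.append_assoc, ih t (acc ++ [b]) (by omega), List.append_assoc]
          rfl
def Rl (n : Nat) : List Int := (List.range n).map (fun k : Nat => (1 : Int) + (k : Int))
def surv (l : List Int) : Int := ((solLoop l).getLast?).getD 0
lemma solLoop_ne_nil (l : List Int) (h : l ≠ []) : solLoop l ≠ [] := by
  induction l using solLoop.induct with
  | case1 a b t ih => rw [solLoop_cons]; exact ih (by simp)
  | case2 l hh => rw [solLoop]; · exact h
                  · exact fun a b t he => absurd he (hh a b t)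
lemma surv_map (g : Int → Int) (l : List Int) (h : l ≠ []) :
    surv (l.map g) = g (surv l) := by
  unfold surv
  rw [solLoop_map, List.getLast?_map]
  obtain ⟨v, hv⟩ := List.exists_mem_of_ne_nil _ (solLoop_ne_nil l h)
  obtain ⟨w, hw⟩ := List.getLast?_isSome.mpr (List.ne_nil_of_mem hv) |> Option.isSome_iff_exists.mp
  simp [hw]
lemma es_range (m : Nat) (f : Nat → Int) :
    es ((List.range (2 * m)).map f) = (List.range m).map (fun i => f (2 * i + 1)) := by
  induction m generalizing f with
  | zero => simp [es]
  | succ m ih =>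
      have h2 : 2 * (m + 1) = (2 * m + 1) + 1 := by ring
      rw [h2, List.range_succ_eq_map, List.range_succ_eq_map, List.range_succ_eq_map]
      simp only [List.map_cons, List.map_map, es]
      rw [ih]
      simp [Function.comp]
      intro a _
      congr 1
lemma Rl_ne_nil (m : Nat) (h : 1 ≤ m) : Rl m ≠ [] := by
  unfold Rl
  intro hc
  have := congrArg List.length hc
  simp at this
  omega
lemma es_Rl (m : Nat) : es (Rl (2 * m)) = (Rl m).map (fun x => 2 * x) := by
  unfold Rl
  rw [es_range]
  simp only [List.map_map]
  apply List.map_congr_left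
  intro i _
  simp [Function.comp]
  ring
lemma surv_even (m : Nat) (h : 1 ≤ m) : surv (Rl (2 * m)) = 2 * surv (Rl m) := by
  have hp := even_pass m (Rl (2*m)) [] (by simp [Rl])
  simp only [List.append_nil, List.nil_append] at hp
  rw [es_Rl] at hp
  have := surv_map (fun x => 2 * x) (Rl m) (Rl_ne_nil m h)
  unfold surv at *
  rw [hp, this]
def pw (n : Nat) : Nat := 2 ^ (Nat.log2 n)
def Fc (n : Nat) : Int := if n = pw n then (n : Int) else 2 * ((n : Int) - (pw n : Int))

lemma Rl_head (m : Nat) (h : 1 ≤ m) : Rl m = (1 : Int) :: (Rl m).drop 1 := by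
  obtain ⟨k, rfl⟩ : ∃ k, m = k + 1 := ⟨m - 1, by omega⟩
  simp [Rl, List.range_succ_eq_map]

lemma rot_Rl (m : Nat) (h : 1 ≤ m) :
    (Rl m).drop 1 ++ [(1 : Int)] = (Rl m).map (fun x => if x = (m : Int) then 1 else x + 1) := by
  unfold Rl
  apply List.ext_getElem
  · simp; omega
  · intro i h1 h2
    simp only [List.length_append, List.length_drop, List.length_map, List.length_range,
      List.length_singleton] at h1 h2
    rw [List.getElem_append]
    split_ifs with hi
    · simp only [List.length_drop, List.length_map, List.length_range] at hi
      simp only [List.getElem_drop, List.getElem_map, List.getElem_range]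
      rw [if_neg (by omega)]
      push_cast; ring
    · simp only [List.length_drop, List.length_map, List.length_range] at hi
      have hz : i - (m - 1) = 0 := by omega
      simp only [List.getElem_singleton, List.getElem_map, List.getElem_range]
      rw [if_pos (by omega)]

lemma Rl_split (m : Nat) : Rl (m + 1) = Rl m ++ [((m : Int) + 1)] := by
  simp [Rl, List.range_succ]; ring

lemma surv_odd (m : Nat) (h : 1 ≤ m) :
    surv (Rl (2 * m + 1)) = 2 * (if surv (Rl m) = (m : Int) then 1 else surv (Rl m) + 1) := by
  have h1 : solLoop (Rl (2 * m + 1)) = solLoop (((2 * m : Int) + 1) :: (Rl m).map (fun x => 2 * x)) := by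
    rw [Rl_split, even_pass m _ _ (by simp [Rl]), es_Rl]
    push_cast
    rfl
  have h2 : (Rl m).map (fun x => 2 * x) = 2 :: (((Rl m).drop 1).map (fun x => 2 * x)) := by
    conv_lhs => rw [Rl_head m h]
    simp
  have h3 : solLoop (Rl (2 * m + 1)) =
      solLoop (((Rl m).drop 1 ++ [(1:Int)]).map (fun x => 2 * x)) := by
    rw [h1, h2, solLoop_cons]
    simp
  rw [rot_Rl m h] at h3
  rw [List.map_map] at h3
  have h4 : surv (Rl (2 * m + 1)) =
      surv ((Rl m).map ((fun x : Int => 2 * x) ∘ (fun x => if x = (m : Int) then 1 else x + 1))) := by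
    unfold surv; rw [h3]
  rw [h4, surv_map _ _ (Rl_ne_nil m h)]
  rfl

lemma pw_bounds (n : Nat) (h : 1 ≤ n) : pw n ≤ n ∧ n < 2 * pw n := by
  unfold pw
  rw [Nat.log2_eq_log_two]
  constructor
  · exact Nat.pow_log_le_self 2 (by omega)
  · have := Nat.lt_pow_succ_log_self (by omega : 1 < 2) n
    rw [pow_succ] at this
    omega

lemma pw_double (m : Nat) (h : 1 ≤ m) : pw (2 * m) = 2 * pw m := by
  unfold pw
  rw [show Nat.log2 (2 * m) = Nat.log2 m + 1 by
    rw [Nat.log2_eq_log_two, Nat.log2_eq_log_two, show 2 * m = m * 2 by ring,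
      Nat.log_mul_base (by omega) (by omega)]]
  ring

lemma pw_odd (m : Nat) (h : 1 ≤ m) : pw (2 * m + 1) = 2 * pw m := by
  unfold pw
  rw [show Nat.log2 (2 * m + 1) = Nat.log2 m + 1 by
    rw [Nat.log2_eq_log_two, Nat.log2_eq_log_two]
    apply Nat.log_eq_of_pow_le_of_lt_pow
    · have := Nat.pow_log_le_self 2 (show m ≠ 0 by omega)
      rw [pow_succ]
      omega
    · have := Nat.lt_pow_succ_log_self (by omega : 1 < 2) m
      rw [pow_succ, pow_succ]
      omega]
  ring

lemma surv_Rl_eq_Fc (n : Nat) (h : 1 ≤ n) : surv (Rl n) = Fc n := by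
  induction n using Nat.strong_induction_on with
  | _ n ih =>
    match n, h with
    | 1, _ =>
        have h1 : Rl 1 = [1] := by simp [Rl]
        have h2 : surv (Rl 1) = 1 := by
          unfold surv; rw [h1, solLoop_one]; rfl
        have h3 : pw 1 = 1 := by rw [pw, Nat.log2_eq_log_two]; simp
        rw [h2]; simp [Fc, h3]
    | (k + 2), _ =>
        set n := k + 2 with hn
        rcases Nat.even_or_odd n with ⟨m, hm⟩ | ⟨m, hm⟩
        · have hm1 : 1 ≤ m := by omega
          have hrec := surv_even m hm1
          have hFm := ih m (by omega) hm1
          have hpw := pw_double m hm1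
          have hb := pw_bounds m hm1
          rw [show n = 2 * m by omega, hrec, hFm]
          unfold Fc
          rw [pw_double m hm1]
          split_ifs with c1 c2 c2
          · push_cast; ring
          · omega
          · omega
          · push_cast; ring
        · have hm1 : 1 ≤ m := by omega
          have hrec := surv_odd m hm1
          have hFm := ih m (by omega) hm1
          have hb := pw_bounds m hm1
          rw [show n = 2 * m + 1 by omega, hrec, hFm]
          unfold Fc
          rw [pw_odd m hm1]
          have hne : ¬ (2 * m + 1 = 2 * pw m) := by omega
          rw [if_neg hne]
          split_ifs with c1 c2 c2
          · push_cast; omega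
          · exact absurd rfl c2
          · exfalso; push_cast at c2; omega
          · push_cast; ring

-- deque bridge: well-formed deques track their length
def dqWF (d : List Int × List Int × Nat) : Prop := d.2.2 = d.1.length + d.2.1.length

lemma dqWF_append (d : List Int × List Int × Nat) (x : Int) (h : dqWF d) :
    dqWF (dqAppend d x) := by
  obtain ⟨f, b, n⟩ := d
  simp [dqWF, dqAppend] at *
  omega

lemma dqToList_append (d : List Int × List Int × Nat) (x : Int) :
    dqToList (dqAppend d x) = dqToList d ++ [x] := by
  obtain ⟨f, b, n⟩ := d
  simp [dqToList, dqAppend]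

lemma dqLen_eq (d : List Int × List Int × Nat) (h : dqWF d) :
    dqLen d = (dqToList d).length := by
  obtain ⟨f, b, n⟩ := d
  simp [dqWF] at h
  simp [dqLen, dqToList, h]

lemma dqPopleft?_eq (d : List Int × List Int × Nat) (x : Int) (r : List Int)
    (h : dqWF d) (hl : dqToList d = x :: r) :
    ∃ d', dqPopleft? d = some (x, d') ∧ dqWF d' ∧ dqToList d' = r := by
  obtain ⟨f, b, n⟩ := d
  simp only [dqWF] at h
  simp only [dqToList] at hl
  cases f with
  | cons y f' =>
      simp only [List.cons_append] at hl
      injection hl with h1 h2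
      subst h1
      subst h2
      obtain ⟨n', rfl⟩ : ∃ n', n = n' + 1 := ⟨f'.length + b.length, by simp at h; omega⟩
      refine ⟨(f', b, n'), rfl, ?_, rfl⟩
      simp [dqWF]
      simp at h
      omega
  | nil =>
      simp only [List.nil_append] at hl
      have hlen := congrArg List.length hl
      simp at hlen h
      obtain ⟨n', rfl⟩ : ∃ n', n = n' + 1 := ⟨r.length, by omega⟩
      refine ⟨(r, [], n'), ?_, ?_, ?_⟩
      · simp [dqPopleft?, hl]
      · simp [dqWF]
        omega
      · simp [dqToList]

lemma solLoopD_toList (fuel : Nat) : ∀ (d : List Int × List Int × Nat),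
    dqWF d → (dqToList d).length ≤ fuel →
    dqToList (solLoopD fuel d) = solLoop (dqToList d) := by
  induction fuel with
  | zero =>
      intro d hwf hle
      have hnil : dqToList d = [] := by
        cases h : dqToList d with
        | nil => rfl
        | cons a t => rw [h] at hle; simp at hle
      rw [solLoopD, hnil, solLoop_nil]
  | succ fuel ih =>
      intro d hwf hle
      rw [solLoopD]
      by_cases hsmall : dqLen d ≤ 1
      · rw [if_pos hsmall]
        rw [dqLen_eq d hwf] at hsmall
        rcases hl : dqToList d with _ | ⟨a, _ | ⟨b', t⟩⟩
        · rw [solLoop_nil]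
        · rw [solLoop_one]
        · rw [hl] at hsmall; simp at hsmall
      · rw [if_neg hsmall]
        rw [dqLen_eq d hwf] at hsmall
        rcases hl : dqToList d with _ | ⟨a, _ | ⟨b', t⟩⟩
        · rw [hl] at hsmall; simp at hsmall
        · rw [hl] at hsmall; simp at hsmall
        · obtain ⟨d1, hp1, hwf1, hl1⟩ := dqPopleft?_eq d a (b' :: t) hwf hl
          obtain ⟨d2, hp2, hwf2, hl2⟩ := dqPopleft?_eq d1 b' t hwf1 hl1
          simp only [hp1, hp2]
          rw [ih (dqAppend d2 b') (dqWF_append d2 b' hwf2) (by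
            rw [dqToList_append, hl2]
            have := congrArg List.length hl
            simp at this ⊢
            omega)]
          rw [dqToList_append, hl2, solLoop_cons]

lemma dq_build (xs : List Int) : ∀ (d : List Int × List Int × Nat), dqWF d →
    dqWF (xs.foldl dqAppend d) ∧ dqToList (xs.foldl dqAppend d) = dqToList d ++ xs := by
  induction xs with
  | nil => intro d h; simp [h]
  | cons x xs ih =>
      intro d h
      obtain ⟨h1, h2⟩ := ih (dqAppend d x) (dqWF_append d x h)
      simp only [List.foldl_cons]
      refine ⟨h1, ?_⟩
      rw [h2, dqToList_append]
      simp

lemma solution_eq_surv (n : Nat) : solution (n : Int) = surv (Rl n) := by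
  unfold solution surv
  obtain ⟨hwf, htl⟩ := dq_build (PySem.List.pyRange 1 ((n : Int) + 1) 1) ([], [], 0) (by simp [dqWF])
  have htl' : dqToList ((PySem.List.pyRange 1 ((n : Int) + 1) 1).foldl dqAppend ([], [], 0)) = Rl n := by
    rw [htl, PySem.List.pyRange_one]
    have h1 : ((n : Int) + 1 - 1).toNat = n := by omega
    rw [h1]
    rfl
  show (dqToList (solLoopD _ _)).getLast?.getD 0 = _
  rw [solLoopD_toList _ _ hwf (by rw [dqLen_eq _ hwf]), htl']

lemma solution_alt_eq_Fc (n : Nat) : solution_alt (n : Int) = Fc n := by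
  unfold solution_alt Fc pw
  simp only [Int.natAbs_natCast]
  have hc : ((2 : Int) ^ Nat.log2 n) = ((2 ^ Nat.log2 n : Nat) : Int) := by push_cast; ring
  rw [hc]
  by_cases hq : n = 2 ^ Nat.log2 n
  · rw [if_pos (by exact_mod_cast hq), if_pos hq]
  · rw [if_neg (by exact_mod_cast hq), if_neg hq]

-- ===== VERDICT (by name: the statement is the Claim_ definition above) =====
theorem solution_spec : Claim_equal_solution := by
  intro s _ hpre
  unfold Pre_solution at hpre
  unfold Spec_solution
  obtain ⟨n, rfl⟩ : ∃ n : Nat, s = (n : Int) :=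
    ⟨s.toNat, (Int.toNat_of_nonneg (by exact le_trans (by norm_num) hpre)).symm⟩
  have hn : 1 ≤ n := by exact_mod_cast hpre
  rw [solution_eq_surv, solution_alt_eq_Fc n, surv_Rl_eq_Fc n hn]
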